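-- pv_equiv track=rewrite | github.com/PierreMartou/CIT-SAT-Implementation | CIT-generation/CTT.py | computeAllPairs
-- ===== SOURCE A (Python) =====
-- def computeAllPairs(testCase, valuesForFactor):
--     possibleSets = []
--     factors = list(valuesForFactor.keys())
--     for i in range(len(factors)-1):
--         pair1 = (factors[i], testCase[factors[i]])
--         for j in range(i+1, len(factors)):
--             pair2 = (factors[j], testCase[factors[j]])
--             possibleSets.append([pair1, pair2])
--     return possibleSets
-- ===== SOURCE B (Python) =====
-- def computeAllPairs(testCase, valuesForFactor):
--     # build each (factor, value) item once, then combine items over suffixes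
--     items = [(f, testCase[f]) for f in valuesForFactor]
--     out = []
--     tail = items
--     while tail:
--         head, tail = tail[0], tail[1:]
--         out.extend([head, b] for b in tail)
--     return out
-- ===== Notes on version B (the rewrite author's own statement) =====
-- stated objective: simpler
-- what changed: B materialises each (factor, value) item exactly once in a first pass and then pairs the items by walking suffixes (head vs rest), replacing A's doubly index-nested range loops with repeated dict lookups per pair. Pre_ excludes inputs where some factor is missing from testCase: there A raises KeyError whenever it performs a lookup (two or more factors), but with fewer than two factors A returns [] without looking anything up while B's eager item-building pass raises.
-- outside the precondition, e.g. on computeAllPairs({'a': 1}, {'b': [3]}): A returns [], B raises KeyError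
import Mathlib
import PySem

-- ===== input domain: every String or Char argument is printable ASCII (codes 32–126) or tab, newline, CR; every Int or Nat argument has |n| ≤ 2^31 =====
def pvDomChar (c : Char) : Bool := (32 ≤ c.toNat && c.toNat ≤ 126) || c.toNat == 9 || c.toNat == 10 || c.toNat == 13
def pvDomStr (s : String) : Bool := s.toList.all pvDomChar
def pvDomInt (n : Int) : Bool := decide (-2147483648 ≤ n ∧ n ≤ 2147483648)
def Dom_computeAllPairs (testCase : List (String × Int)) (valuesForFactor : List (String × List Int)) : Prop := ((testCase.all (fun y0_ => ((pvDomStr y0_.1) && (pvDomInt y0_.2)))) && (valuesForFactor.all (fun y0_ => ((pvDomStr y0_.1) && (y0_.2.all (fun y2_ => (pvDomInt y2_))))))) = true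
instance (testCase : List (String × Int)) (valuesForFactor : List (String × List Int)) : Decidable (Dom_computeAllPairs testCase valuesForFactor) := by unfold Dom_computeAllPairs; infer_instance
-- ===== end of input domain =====

-- B builds each (factor, value) item once and pairs them over suffixes, instead of A's
-- doubly index-nested range loops with a dict lookup per pair element (objective: simpler).

-- testCase[f]: first-match association-list lookup, total form (default 0 where Python
-- raises KeyError; those inputs are excluded by Pre_); used by both ports.
def pyDictGetD (testCase : List (String × Int)) (f : String) : Int :=
  (testCase.lookup f).getD 0

-- ===== PORT A =====
def computeAllPairs (testCase : List (String × Int)) (valuesForFactor : List (String × List Int)) : List (List (String × Int)) :=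
  let factors := valuesForFactor.map Prod.fst
  (PySem.List.pyRange 0 (PySem.List.len factors - 1) 1).foldl (fun possibleSets i =>
    let f1 := PySem.List.pyGetD factors i ""
    let pair1 := (f1, pyDictGetD testCase f1)
    (PySem.List.pyRange (i + 1) (PySem.List.len factors) 1).foldl (fun acc j =>
      let f2 := PySem.List.pyGetD factors j ""
      acc ++ [[pair1, (f2, pyDictGetD testCase f2)]]) possibleSets) []

-- ===== PORT B =====
-- the while-loop of Source B: head, tail = tail[0], tail[1:]; out.extend([head, b] for b in tail)
def altLoop (tail : List (String × Int)) (out : List (List (String × Int))) : List (List (String × Int)) :=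
  match tail with
  | [] => out
  | head :: tail' => altLoop tail' (out ++ tail'.map (fun b => [head, b]))

def computeAllPairs_alt (testCase : List (String × Int)) (valuesForFactor : List (String × List Int)) : List (List (String × Int)) :=
  let items := valuesForFactor.map (fun p => (p.1, pyDictGetD testCase p.1))
  altLoop items []

-- ===== PRECONDITION & SPEC =====
-- Pre_ excludes inputs where some factor has no binding in testCase: with two or more
-- factors Python A raises KeyError there, and with fewer than two factors A returns []
-- without performing any lookup while B's eager item-building pass raises KeyError.
def Pre_computeAllPairs (testCase : List (String × Int)) (valuesForFactor : List (String × List Int)) : Prop :=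
  ∀ p ∈ valuesForFactor, p.1 ∈ testCase.map Prod.fst
instance (testCase : List (String × Int)) (valuesForFactor : List (String × List Int)) : Decidable (Pre_computeAllPairs testCase valuesForFactor) := by unfold Pre_computeAllPairs; infer_instance

def pvWitness_computeAllPairs : (List (String × Int)) × (List (String × List Int)) :=
  ([("a", 1), ("b", 2), ("c", 3)], [("a", [1]), ("b", [2]), ("c", [3])])

def Spec_computeAllPairs (testCase : List (String × Int)) (valuesForFactor : List (String × List Int)) (out : List (List (String × Int))) : Prop := out = computeAllPairs_alt testCase valuesForFactor
instance (testCase : List (String × Int)) (valuesForFactor : List (String × List Int)) (out : List (List (String × Int))) : Decidable (Spec_computeAllPairs testCase valuesForFactor out) := by unfold Spec_computeAllPairs; infer_instance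

-- ===== CLAIM (what is proved, stated in full; the proofs are below) =====
def Claim_equal_computeAllPairs : Prop := ∀ (testCase : List (String × Int)) (valuesForFactor : List (String × List Int)), Dom_computeAllPairs testCase valuesForFactor → Pre_computeAllPairs testCase valuesForFactor → Spec_computeAllPairs testCase valuesForFactor (computeAllPairs testCase valuesForFactor)

-- ===== LEMMAS AND PROOFS =====

-- proof-only canonical "all ordered pairs" of a list
def pairsOf (l : List (String × Int)) : List (List (String × Int)) :=
  match l with
  | [] => []
  | h :: t => t.map (fun b => [h, b]) ++ pairsOf t

theorem altLoop_eq_pairsOf (l : List (String × Int)) :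
    ∀ out, altLoop l out = out ++ pairsOf l := by
  induction l with
  | nil => intro out; simp [altLoop, pairsOf]
  | cons h t ih => intro out; simp [altLoop, pairsOf, ih, List.append_assoc]

-- A's nested index loops, flattened to flatMap form, equal pairsOf of the mapped items
theorem flatMap_range_eq_pairsOf (g : String → String × Int) (fs : List String) :
    (List.range fs.length).flatMap
      (fun k => (fs.drop (k + 1)).map (fun y => [g (fs.getD k ""), g y]))
    = pairsOf (fs.map g) := by
  induction fs with
  | nil => simp [pairsOf]
  | cons x t ih =>
    rw [List.length_cons, List.range_succ_eq_map]
    simp only [List.flatMap_cons, List.flatMap_map]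
    have h2 : ∀ k, (fun k => ((x :: t).drop (k + 1)).map
          (fun y => [g ((x :: t).getD k ""), g y])) (k + 1)
        = (t.drop (k + 1)).map (fun y => [g (t.getD k ""), g y]) := by
      intro k; simp
    simp only [Nat.succ_eq_add_one, h2, ih]
    simp [pairsOf, List.map_map, Function.comp_def, List.getD]

theorem computeAllPairs_eq (testCase : List (String × Int)) (valuesForFactor : List (String × List Int)) :
    computeAllPairs testCase valuesForFactor = computeAllPairs_alt testCase valuesForFactor := by
  unfold computeAllPairs computeAllPairs_alt
  dsimp only
  set g : String → String × Int := fun f => (f, pyDictGetD testCase f) with hg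
  set fs : List String := valuesForFactor.map Prod.fst with hfs
  have hitems : valuesForFactor.map (fun p => (p.1, pyDictGetD testCase p.1)) = fs.map g := by
    simp [hfs, hg, List.map_map, Function.comp_def]
  rw [hitems, altLoop_eq_pairsOf, List.nil_append, ← flatMap_range_eq_pairsOf g fs]
  -- now reduce A's folds
  rw [PySem.List.pyRange_one 0 (PySem.List.len fs - 1)]
  rw [List.foldl_map]
  have hlen : ((PySem.List.len fs - 1) - 0).toNat = fs.length - 1 := by
    rw [PySem.List.len_eq]; omega
  rw [hlen]
  -- inner loop: fold over pyRange (k+1) len = fold over drop (k+1), then append-singleton = map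
  have hinner : ∀ (k : Nat) (acc : List (List (String × Int))),
      (PySem.List.pyRange ((0 + (k : Int)) + 1) (PySem.List.len fs) 1).foldl
        (fun acc2 j => acc2 ++ [[(PySem.List.pyGetD fs (0 + (k : Int)) "", pyDictGetD testCase (PySem.List.pyGetD fs (0 + (k : Int)) "")),
                                 (PySem.List.pyGetD fs j "", pyDictGetD testCase (PySem.List.pyGetD fs j ""))]]) acc
      = acc ++ (fs.drop (k + 1)).map (fun y => [g (fs.getD k ""), g y]) := by
    intro k acc
    have h0 : (0 : Int) + (k : Int) = ((k : Nat) : Int) := by omega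
    rw [h0]
    have h1 : ((k : Int) + 1) = (((k + 1 : Nat)) : Int) := by push_cast; ring
    rw [h1, PySem.List.len_eq,
        PySem.List.foldl_pyRange_pyGetD' fs ""
          (fun acc2 y => acc2 ++ [[(PySem.List.pyGetD fs ((k : Nat) : Int) "", pyDictGetD testCase (PySem.List.pyGetD fs ((k : Nat) : Int) "")), (y, pyDictGetD testCase y)]]) acc
          (Int.natCast_nonneg _)]
    rw [PySem.List.foldl_append_singleton_eq_map]
    simp [hg, PySem.List.pyGetD_natCast]
  simp only [hinner]
  rw [PySem.List.foldl_append_eq_flatMap]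
  rw [List.nil_append]
  -- extend range (n-1) to range n: the last index contributes nothing
  rcases fs.eq_nil_or_concat with h | ⟨pre, y, h⟩
  · simp [h]
  · have hlen2 : fs.length = pre.length + 1 := by simp [h]
    rw [hlen2]
    simp only [Nat.add_sub_cancel, List.range_succ, List.flatMap_append, List.flatMap_cons,
      List.flatMap_nil]
    simp
    omega

-- ===== VERDICT (by name: the statement is the Claim_ definition above) =====
theorem computeAllPairs_spec : Claim_equal_computeAllPairs := by
  intro tc vf _ _
  unfold Spec_computeAllPairs
  exact computeAllPairs_eq tc vf
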